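-- pv_equiv track=rewrite | github.com/sdf1444/CMT-303-Software-Engineering | src/core/calculations.py | switch_marks
-- ===== SOURCE A (Python) =====
-- def switch_marks( marks=[23, 56, 54, 76, 67, 65, 34, 76, 34, 76]):
--
--     failure = 0
--     passed = 0
--     merit = 0
--     distintion = 0
--     for m in marks:
--         if m < 50:
--             failure += 1
--         elif m > 50 and  m < 60:
--             passed += 1
--         elif m >= 60 and m < 70:
--             merit += 1
--         elif m >= 70:
--             distintion += 1
--
--     return (failure, passed, merit, distintion)
-- ===== SOURCE B (Python) =====
-- def switch_marks(marks=[23, 56, 54, 76, 67, 65, 34, 76, 34, 76]):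
--     failure = sum(1 for m in marks if m < 50)
--     passed = sum(1 for m in marks if 50 < m < 60)
--     merit = sum(1 for m in marks if 60 <= m < 70)
--     distinction = sum(1 for m in marks if m >= 70)
--     return (failure, passed, merit, distinction)
-- ===== Notes on version B (the rewrite author's own statement) =====
-- stated objective: simpler
-- what changed: Replaced the single loop with a mutable if/elif branch chain by four independent one-line counting passes, one per grade band.
import Mathlib
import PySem

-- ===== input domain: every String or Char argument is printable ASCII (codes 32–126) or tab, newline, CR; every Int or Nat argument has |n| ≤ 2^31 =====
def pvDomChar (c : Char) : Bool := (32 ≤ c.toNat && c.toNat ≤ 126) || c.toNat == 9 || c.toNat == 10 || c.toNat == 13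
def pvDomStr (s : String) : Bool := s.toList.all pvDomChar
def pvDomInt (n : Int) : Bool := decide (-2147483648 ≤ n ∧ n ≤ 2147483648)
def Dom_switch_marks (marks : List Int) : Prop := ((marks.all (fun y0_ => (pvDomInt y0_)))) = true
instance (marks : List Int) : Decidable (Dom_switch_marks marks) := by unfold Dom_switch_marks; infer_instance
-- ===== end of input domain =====

-- B replaces A's single mutable branch-chain loop by four independent counting passes (objective: simpler).

-- ===== PORT A =====
-- one loop over marks updating the 4-counter state, branches in A's order
def switch_marks (marks : List Int) : Int × Int × Int × Int :=
  marks.foldl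
    (fun (st : Int × Int × Int × Int) (m : Int) =>
      let (failure, passed, merit, distintion) := st
      if m < 50 then (failure + 1, passed, merit, distintion)
      else if m > 50 ∧ m < 60 then (failure, passed + 1, merit, distintion)
      else if m ≥ 60 ∧ m < 70 then (failure, passed, merit + 1, distintion)
      else if m ≥ 70 then (failure, passed, merit, distintion + 1)
      else (failure, passed, merit, distintion))
    (0, 0, 0, 0)

-- ===== PORT B =====
-- four independent counting passes (sum(1 for m in marks if cond))
def switch_marks_alt (marks : List Int) : Int × Int × Int × Int :=
  ((marks.countP (fun m => m < 50) : Int),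
   (marks.countP (fun m => 50 < m ∧ m < 60) : Int),
   (marks.countP (fun m => 60 ≤ m ∧ m < 70) : Int),
   (marks.countP (fun m => m ≥ 70) : Int))

-- ===== PRECONDITION & SPEC =====
def Spec_switch_marks (marks : List Int) (out : Int × Int × Int × Int) : Prop := out = switch_marks_alt marks
instance (marks : List Int) (out : Int × Int × Int × Int) : Decidable (Spec_switch_marks marks out) := by unfold Spec_switch_marks; infer_instance

-- ===== CLAIM (what is proved, stated in full; the proofs are below) =====
def Claim_equal_switch_marks : Prop := ∀ (marks : List Int), Dom_switch_marks marks → Spec_switch_marks marks (switch_marks marks)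

-- ===== LEMMAS AND PROOFS =====

theorem switch_marks_fold_invariant (marks : List Int) (f p me d : Int) :
    marks.foldl
      (fun st m =>
        let (failure, passed, merit, distintion) := st
        if m < 50 then (failure + 1, passed, merit, distintion)
        else if m > 50 ∧ m < 60 then (failure, passed + 1, merit, distintion)
        else if m ≥ 60 ∧ m < 70 then (failure, passed, merit + 1, distintion)
        else if m ≥ 70 then (failure, passed, merit, distintion + 1)
        else (failure, passed, merit, distintion))
      (f, p, me, d)
    = (f + (marks.countP (fun m => m < 50) : Int),
       p + (marks.countP (fun m => 50 < m ∧ m < 60) : Int),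
       me + (marks.countP (fun m => 60 ≤ m ∧ m < 70) : Int),
       d + (marks.countP (fun m => m ≥ 70) : Int)) := by
  induction marks generalizing f p me d with
  | nil => simp
  | cons m rest ih =>
    simp only [List.foldl_cons, List.countP_cons]
    split_ifs with h1 h2 h3 h4 <;>
      (rw [ih]; clear ih; simp only [Prod.mk.injEq]; refine ⟨?_, ?_, ?_, ?_⟩ <;>
        (try simp only [decide_eq_true_eq, not_and, not_lt, not_le] at *) <;>
        push_cast <;> omega)

-- ===== VERDICT (by name: the statement is the Claim_ definition above) =====
theorem switch_marks_spec : Claim_equal_switch_marks := by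
  intro marks _
  unfold Spec_switch_marks switch_marks switch_marks_alt
  rw [switch_marks_fold_invariant]
  simp
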